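-- pv_equiv track=rewrite | github.com/rishabhmonga/practice | Algo/GreedQuotient.py | find_greed_quotient
-- ===== SOURCE A (Python) =====
-- def find_greed_quotient(input_list):
--     """
--     :param input_list:
--     :returns: Greed Quotient of a given list
--              -1 is GQ is not possible
--     """
--     input_list.sort()
--     N = len(input_list)
--     quotient = []
--     for i in range(N):
--         if (input_list[i] >= N - i) and __check_remaining(input_list, N - i):
--             quotient.append(N - i)
--     return max(quotient) if len(quotient) != 0 else -1
--
-- def __check_remaining(input_list, quotient):
--     """
--     checks the N-GQ condition
--     :param input_list:
--     :param quotient: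
--     :return:
--     """
--     remaining = 0
--     for i in input_list:
--         if i < quotient:
--             remaining += 1
--     if remaining == len(input_list) - quotient:
--         return True
--     return False
-- ===== SOURCE B (Python) =====
-- def find_greed_quotient(input_list):
--     """Greed Quotient via one sorted copy and a descending two-pointer scan; -1 if impossible.
--     (Does not mutate input_list, unlike the original which sorts it in place.)"""
--     s = sorted(input_list)
--     n = len(s)
--     j = n  # j will track the number of elements strictly below the current candidate q
--     for q in range(n, 0, -1):
--         while j > 0 and s[j - 1] >= q:
--             j -= 1
--         if j == n - q:
--             return q
--     return -1
-- ===== Notes on version B (the rewrite author's own statement) =====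
-- stated objective: alternative
-- what changed: Instead of re-scanning the whole list to count small elements for every candidate quotient and taking the max of all hits, B sorts once and runs a single descending two-pointer scan that maintains the count of elements below the current candidate, returning the first (= largest) candidate that satisfies the condition.
import Mathlib
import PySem

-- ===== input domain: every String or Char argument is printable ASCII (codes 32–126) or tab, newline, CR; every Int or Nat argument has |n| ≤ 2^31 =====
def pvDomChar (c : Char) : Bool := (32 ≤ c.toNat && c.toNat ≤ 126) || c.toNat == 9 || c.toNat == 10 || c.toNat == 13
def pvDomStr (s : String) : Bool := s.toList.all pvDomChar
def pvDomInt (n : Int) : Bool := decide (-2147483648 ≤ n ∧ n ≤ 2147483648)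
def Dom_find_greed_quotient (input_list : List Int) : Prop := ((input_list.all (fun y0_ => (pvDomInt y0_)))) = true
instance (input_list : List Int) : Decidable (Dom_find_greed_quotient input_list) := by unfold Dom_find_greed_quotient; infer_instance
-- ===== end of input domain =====

-- B replaces A's per-candidate rescan of the list by one sorted copy plus a descending
-- two-pointer scan (first hit = answer); return-value equivalence only: A sorts its
-- argument in place, B does not mutate it.


-- ===== PORT A =====
-- __check_remaining(input_list, quotient)
def pvCheckRemaining (input_list : List Int) (quotient : Int) : Bool :=
  let remaining : Int := input_list.foldl (fun r i => if i < quotient then r + 1 else r) 0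
  if remaining = (input_list.length : Int) - quotient then true else false

def find_greed_quotient (input_list : List Int) : Int :=
  let s := PySem.List.sorted input_list (fun x => x) false   -- input_list.sort()
  let N := s.length
  let quotient : List Int := (PySem.List.pyRange 0 (N : Int) 1).foldl
    (fun acc i =>
      if (decide (PySem.List.pyGetD s i 0 ≥ (N : Int) - i) && pvCheckRemaining s ((N : Int) - i)) = true
      then acc ++ [(N : Int) - i] else acc) []
  if quotient.length ≠ 0 then (PySem.List.max? quotient (fun x => x)).getD 0 else -1

-- ===== PORT B =====
-- the inner 'while j > 0 and s[j-1] >= q: j -= 1' (structural recursion on j)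
def pvShrink (s : List Int) (q : Int) : Nat → Nat
  | 0 => 0
  | j + 1 => if PySem.List.pyGetD s (j : Int) 0 ≥ q then pvShrink s q j else j + 1

-- 'for q in range(n, 0, -1)' threading the pointer j (structural countdown on q)
def pvScan (s : List Int) : Nat → Nat → Int
  | 0, _ => -1
  | q + 1, j =>
    let j' := pvShrink s ((q : Int) + 1) j
    if (j' : Int) = (s.length : Int) - ((q : Int) + 1) then (q : Int) + 1 else pvScan s q j'

def find_greed_quotient_alt (input_list : List Int) : Int :=
  let s := PySem.List.sorted input_list (fun x => x) false   -- s = sorted(input_list)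
  pvScan s s.length s.length

-- ===== PRECONDITION & SPEC =====
def Spec_find_greed_quotient (input_list : List Int) (out : Int) : Prop := out = find_greed_quotient_alt input_list
instance (input_list : List Int) (out : Int) : Decidable (Spec_find_greed_quotient input_list out) := by unfold Spec_find_greed_quotient; infer_instance

-- ===== CLAIM (what is proved, stated in full; the proofs are below) =====
def Claim_equal_find_greed_quotient : Prop := ∀ (input_list : List Int), Dom_find_greed_quotient input_list → Spec_find_greed_quotient input_list (find_greed_quotient input_list)

-- ===== LEMMAS AND PROOFS =====

-- number of elements strictly below q
def pvCnt (s : List Int) (q : Int) : Nat := s.countP (fun x => decide (x < q))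

lemma pvCnt_le_length (s : List Int) (q : Int) : pvCnt s q ≤ s.length :=
  List.countP_le_length

lemma pvCnt_mono (s : List Int) {q q' : Int} (h : q ≤ q') : pvCnt s q ≤ pvCnt s q' := by
  apply List.countP_mono_left
  intro x _ hx
  simp only [decide_eq_true_eq] at hx ⊢
  omega

-- sorted & s[j] ≥ q ⟹ at most j elements are < q
lemma pvCnt_le_of_ge (s : List Int) (q : Int) (hp : s.Pairwise (· ≤ ·)) {j : Nat} (hj : j < s.length)
    (hq : q ≤ s[j]) : pvCnt s q ≤ j := by
  have hdrop : (s.drop j).countP (fun x => decide (x < q)) = 0 := by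
    rw [List.countP_eq_zero]
    intro x hx
    obtain ⟨k, hk, hxk⟩ := List.mem_iff_getElem.mp hx
    have hjk : j + k < s.length := by simp at hk; omega
    have hkd : (s.drop j)[k] = s[j + k]'hjk := List.getElem_drop ..
    have hle : s[j] ≤ s[j + k]'hjk := by
      rcases Nat.eq_zero_or_pos k with h0 | h0
      · subst h0; simp
      · exact List.pairwise_iff_getElem.mp hp j (j + k) hj hjk (by omega)
    rw [← hxk, hkd]
    simp only [decide_eq_true_eq, not_lt]
    omega
  have hT : (s.take j).countP (fun x => decide (x < q)) ≤ j := by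
    calc (s.take j).countP (fun x => decide (x < q)) ≤ (s.take j).length := List.countP_le_length
      _ ≤ j := by simp
  have hsplit : pvCnt s q = (s.take j).countP (fun x => decide (x < q))
      + (s.drop j).countP (fun x => decide (x < q)) := by
    unfold pvCnt
    conv_lhs => rw [← List.take_append_drop j s]
    rw [List.countP_append]
  omega

-- sorted & s[j] < q ⟹ at least j+1 elements are < q
lemma pvCnt_ge_of_lt (s : List Int) (q : Int) (hp : s.Pairwise (· ≤ ·)) {j : Nat} (hj : j < s.length)
    (hq : s[j] < q) : j + 1 ≤ pvCnt s q := by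
  have htake : (s.take (j + 1)).countP (fun x => decide (x < q)) = (s.take (j + 1)).length := by
    rw [List.countP_eq_length]
    intro x hx
    obtain ⟨k, hk, hxk⟩ := List.mem_iff_getElem.mp hx
    have hklt : k < j + 1 := by simp at hk; omega
    have hkl : k < s.length := by omega
    have hxk' : x = s[k] := by rw [← hxk]; exact List.getElem_take
    have hle : s[k] ≤ s[j] := by
      rcases Nat.lt_or_ge k j with h0 | h0
      · exact List.pairwise_iff_getElem.mp hp k j hkl hj h0
      · have : k = j := by omega
        subst this; exact le_refl _
    rw [hxk']
    simp only [decide_eq_true_eq]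
    omega
  have hlen : (s.take (j + 1)).length = j + 1 := by simp; omega
  have hsplit : pvCnt s q = (s.take (j + 1)).countP (fun x => decide (x < q))
      + (s.drop (j + 1)).countP (fun x => decide (x < q)) := by
    unfold pvCnt
    conv_lhs => rw [← List.take_append_drop (j + 1) s]
    rw [List.countP_append]
  omega

-- the while loop lands exactly on the count
lemma pvShrink_eq (s : List Int) (hp : s.Pairwise (· ≤ ·)) (q : Int) :
    ∀ j, j ≤ s.length → pvCnt s q ≤ j → pvShrink s q j = pvCnt s q := by
  intro j
  induction j with
  | zero => intro _ h; unfold pvShrink; omega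
  | succ j ih =>
    intro hjN hc
    have hjlt : j < s.length := by omega
    unfold pvShrink
    have hget : PySem.List.pyGetD s (j : Int) 0 = s[j] := by
      rw [PySem.List.pyGetD_natCast, List.getD_eq_getElem?_getD, List.getElem?_eq_getElem hjlt]
      rfl
    rw [hget]
    split_ifs with h
    · exact ih (by omega) (pvCnt_le_of_ge s q hp hjlt h)
    · have := pvCnt_ge_of_lt s q hp hjlt (by omega)
      omega

-- reference: the answer as a descending first-hit over candidates
def pvRef (s : List Int) : Nat → Int
  | 0 => -1
  | q + 1 => if ((pvCnt s ((q : Int) + 1) : Int) = (s.length : Int) - ((q : Int) + 1))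
             then (q : Int) + 1 else pvRef s q

lemma pvScan_eq_ref (s : List Int) (hp : s.Pairwise (· ≤ ·)) :
    ∀ (q j : Nat), pvCnt s ((q : Nat) : Int) ≤ j → j ≤ s.length → pvScan s q j = pvRef s q := by
  intro q
  induction q with
  | zero => intro j _ _; rfl
  | succ q ih =>
    intro j hc hj
    unfold pvScan pvRef
    have hc' : pvCnt s ((q : Int) + 1) ≤ j := by
      have := hc; push_cast at this ⊢; omega
    rw [pvShrink_eq s hp _ j hj hc']
    show (if ((pvCnt s ((q : Int) + 1) : Int) = (s.length : Int) - ((q : Int) + 1))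
          then ((q : Int) + 1) else pvScan s q (pvCnt s ((q : Int) + 1))) = _
    split_ifs with h
    · rfl
    · exact ih _ (pvCnt_mono s (q := (q : Int)) (q' := (q : Int) + 1) (by omega))
        (pvCnt_le_length s _)

-- B's port computes pvRef
lemma alt_eq_ref (l : List Int) :
    find_greed_quotient_alt l
      = pvRef (PySem.List.sorted l (fun x => x) false) (PySem.List.sorted l (fun x => x) false).length := by
  unfold find_greed_quotient_alt
  exact pvScan_eq_ref _ (PySem.List.sorted_pairwise l (fun x => x)) _ _
    (pvCnt_le_length _ _) (le_refl _)

-- __check_remaining is the count condition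
lemma checkRemaining_eq (s : List Int) (q : Int) :
    pvCheckRemaining s q = decide ((pvCnt s q : Int) = (s.length : Int) - q) := by
  unfold pvCheckRemaining pvCnt
  rw [PySem.List.foldl_ite_add_one (p := fun i => i < q)]
  simp

-- A's loop condition, on indices 0 ≤ i < N, is just the count condition
lemma condA_iff (s : List Int) (hp : s.Pairwise (· ≤ ·)) (i : Int)
    (h0 : 0 ≤ i) (hN : i < (s.length : Int)) :
    ((decide (PySem.List.pyGetD s i 0 ≥ (s.length : Int) - i) && pvCheckRemaining s ((s.length : Int) - i)) = true)
      ↔ ((pvCnt s ((s.length : Int) - i) : Int) = i) := by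
  rw [checkRemaining_eq]
  have hi : i.toNat < s.length := by omega
  have hget : PySem.List.pyGetD s i 0 = s[i.toNat] := by
    conv_lhs => rw [show i = ((i.toNat : Nat) : Int) from by omega]
    rw [PySem.List.pyGetD_natCast, List.getD_eq_getElem?_getD, List.getElem?_eq_getElem hi]
    rfl
  constructor
  · rintro h
    simp only [Bool.and_eq_true, decide_eq_true_eq] at h
    have := h.2
    omega
  · intro h
    simp only [Bool.and_eq_true, decide_eq_true_eq]
    refine ⟨?_, by omega⟩
    rw [hget]
    by_contra hlt
    have := pvCnt_ge_of_lt s ((s.length : Int) - i) hp hi (by omega)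
    omega

-- a strictly decreasing nonempty list's Python max is its head
lemma max_of_pairwise_gt (x : Int) (t : List Int) (h : ∀ y ∈ t, y ≤ x) :
    (PySem.List.max? (x :: t) (fun y => y)).getD 0 = x := by
  rw [PySem.List.max?_id_cons]
  have h1 := (PySem.List.le_foldl_max t x).1
  rcases PySem.List.foldl_max_mem t x with h2 | h2
  · simp [h2]
  · have := h _ h2
    simp only [Option.getD_some]
    omega

-- descending first hit over the filtered candidate list = pvRef
lemma headD_filter_eq_ref (s : List Int) :
    ∀ q : Nat, q ≤ s.length →
      ((((PySem.List.pyRange ((s.length : Int) - q) (s.length : Int) 1).filter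
          (fun i => decide ((pvCnt s ((s.length : Int) - i) : Int) = i))).map
          (fun i => (s.length : Int) - i)).headD (-1)) = pvRef s q := by
  intro q
  induction q with
  | zero =>
    intro _
    rw [PySem.List.pyRange_one_eq_nil (by omega)]
    rfl
  | succ q ih =>
    intro hq
    rw [PySem.List.pyRange_one_cons (by push_cast; omega)]
    rw [List.filter_cons]
    have harith : (s.length : Int) - ((s.length : Int) - (q + 1 : Nat)) = (q : Int) + 1 := by
      push_cast; ring
    split_ifs with h
    · simp only [List.map_cons, List.headD_cons]
      unfold pvRef
      simp only [decide_eq_true_eq] at h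
      rw [harith] at h
      rw [if_pos (by exact_mod_cast h)]
      push_cast; ring
    · have hstep : (s.length : Int) - (q + 1 : Nat) + 1 = (s.length : Int) - (q : Nat) := by
        push_cast; ring
      rw [hstep]
      unfold pvRef
      simp only [decide_eq_true_eq] at h
      rw [harith] at h
      rw [if_neg (by exact_mod_cast h)]
      exact ih (by omega)

-- A's port computes pvRef too
lemma a_eq_ref (l : List Int) :
    find_greed_quotient l
      = pvRef (PySem.List.sorted l (fun x => x) false) (PySem.List.sorted l (fun x => x) false).length := by
  unfold find_greed_quotient
  set s := PySem.List.sorted l (fun x => x) false with hs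
  have hp : s.Pairwise (· ≤ ·) := PySem.List.sorted_pairwise l (fun x => x)
  show (if ((PySem.List.pyRange 0 (s.length : Int) 1).foldl
      (fun acc i =>
        if (decide (PySem.List.pyGetD s i 0 ≥ (s.length : Int) - i) && pvCheckRemaining s ((s.length : Int) - i)) = true
        then acc ++ [(s.length : Int) - i] else acc) []).length ≠ 0
    then (PySem.List.max? ((PySem.List.pyRange 0 (s.length : Int) 1).foldl
      (fun acc i =>
        if (decide (PySem.List.pyGetD s i 0 ≥ (s.length : Int) - i) && pvCheckRemaining s ((s.length : Int) - i)) = true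
        then acc ++ [(s.length : Int) - i] else acc) []) (fun x => x)).getD 0 else -1) = pvRef s s.length
  rw [PySem.List.foldl_append_if
    (p := fun i => decide (PySem.List.pyGetD s i 0 ≥ (s.length : Int) - i) && pvCheckRemaining s ((s.length : Int) - i))
    (f := fun i => (s.length : Int) - i)]
  rw [List.nil_append]
  rw [List.filter_congr (q := fun i => decide ((pvCnt s ((s.length : Int) - i) : Int) = i))
    (fun i hi => by
      have hmem := (PySem.List.mem_pyRange_one).mp hi
      have hiff := condA_iff s hp i hmem.1 hmem.2
      show (decide (PySem.List.pyGetD s i 0 ≥ (s.length : Int) - i) && pvCheckRemaining s ((s.length : Int) - i))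
        = decide ((pvCnt s ((s.length : Int) - i) : Int) = i)
      by_cases hP : (pvCnt s ((s.length : Int) - i) : Int) = i
      · rw [hiff.mpr hP, decide_eq_true hP]
      · rw [decide_eq_false hP]
        exact Bool.eq_false_iff.mpr (fun hc => hP (hiff.mp hc)))]
  have hhead := headD_filter_eq_ref s s.length (le_refl _)
  rw [show (s.length : Int) - (s.length : Nat) = 0 by ring] at hhead
  set L := (((PySem.List.pyRange 0 (s.length : Int) 1).filter
      (fun i => decide ((pvCnt s ((s.length : Int) - i) : Int) = i))).map
      (fun i => (s.length : Int) - i)) with hL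
  have hpw : L.Pairwise (· > ·) := by
    apply List.Pairwise.map
    · intro a b hab
      exact sub_lt_sub_left hab _
    · exact (PySem.List.pairwise_lt_pyRange_one 0 (s.length : Int)).filter _
  cases hLc : L with
  | nil => simp [hLc] at hhead ⊢; omega
  | cons x t =>
    rw [hLc] at hhead hpw
    have hmax : (PySem.List.max? (x :: t) (fun y => y)).getD 0 = x := by
      apply max_of_pairwise_gt
      intro y hy
      have := (List.pairwise_cons.mp hpw).1 y hy
      omega
    simp only [List.length_cons, ne_eq, Nat.succ_ne_zero, not_false_iff, if_true, hmax]
    simpa using hhead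

-- ===== VERDICT (by name: the statement is the Claim_ definition above) =====
theorem find_greed_quotient_spec : Claim_equal_find_greed_quotient := by
  intro l _
  unfold Spec_find_greed_quotient
  rw [a_eq_ref, alt_eq_ref]
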